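-- pv_equiv track=rewrite | github.com/bprah/2802ICT-Rush-Hour | rush_hour.py | clean_movement_path
-- ===== SOURCE A (Python) =====
-- def clean_movement_path(movement_path):
--     counter = 1
--     clean_path = []
--     for i in range(len(movement_path)):
--
--         if i == len(movement_path) - 1:
--
--             clean_path.append(movement_path[i][0:2] + str(counter))
--
--         elif movement_path[i] == movement_path[i + 1]:
--             counter += 1
--
--         else:
--             clean_path.append(movement_path[i][0:2] + str(counter))
--             counter = 1
--     return clean_path
-- ===== SOURCE B (Python) =====
-- def clean_movement_path(movement_path):
--     clean_path = []
--     i = 0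
--     n = len(movement_path)
--     while i < n:
--         j = i + 1
--         while j < n and movement_path[j] == movement_path[i]:
--             j += 1
--         clean_path.append(movement_path[i][0:2] + str(j - i))
--         i = j
--     return clean_path
-- ===== Notes on version B (the rewrite author's own statement) =====
-- stated objective: alternative
-- what changed: B loops over maximal runs, an inner scan finding the end of each run of equal entries, instead of A's single index loop carrying a counter, a lookahead comparison and a special last-index branch.
import Mathlib
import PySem

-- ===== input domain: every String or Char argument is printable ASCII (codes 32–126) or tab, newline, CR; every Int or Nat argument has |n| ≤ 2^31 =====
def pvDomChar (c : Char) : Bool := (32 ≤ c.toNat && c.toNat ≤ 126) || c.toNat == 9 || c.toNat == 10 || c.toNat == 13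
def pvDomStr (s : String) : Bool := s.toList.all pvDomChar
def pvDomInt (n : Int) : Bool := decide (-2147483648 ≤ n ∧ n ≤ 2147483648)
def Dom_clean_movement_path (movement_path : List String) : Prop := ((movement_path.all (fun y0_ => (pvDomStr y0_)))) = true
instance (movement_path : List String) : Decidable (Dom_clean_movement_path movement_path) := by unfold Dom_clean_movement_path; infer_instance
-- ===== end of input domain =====

-- B rewrites A's run-length compression as a loop over maximal runs (inner scan per run)
-- instead of A's index loop with counter, lookahead and last-index branch; alternative, same cost.

-- shared tiny helper: s[0:2] + str(c), used verbatim by both Pythons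
def pvEmit (s : String) (c : Int) : String :=
  PySem.Str.slice s (some 0) (some 2) ++ PySem.Int.toStr c

-- ===== PORT A =====
-- loop body of A's `for i in range(len(movement_path))`
def pvStepA (mp : List String) (st : Int × List String) (i : Int) : Int × List String :=
  if i = (mp.length : Int) - 1 then
    (st.1, st.2 ++ [pvEmit (PySem.List.pyGetD mp i "") st.1])
  else if PySem.List.pyGetD mp i "" == PySem.List.pyGetD mp (i + 1) "" then
    (st.1 + 1, st.2)
  else
    (1, st.2 ++ [pvEmit (PySem.List.pyGetD mp i "") st.1])

def clean_movement_path (movement_path : List String) : List String :=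
  ((PySem.List.pyRange 0 (movement_path.length : Int) 1).foldl
    (pvStepA movement_path) (1, [])).2

-- ===== PORT B =====
-- B's inner `while`: scan off the run of entries equal to x; returns (run length, rest)
def pvRun (x : String) : List String → Nat × List String
  | [] => (0, [])
  | y :: ys => if y == x then ((pvRun x ys).1 + 1, (pvRun x ys).2) else (0, y :: ys)

lemma pvRun_snd_length_le (x : String) (ys : List String) :
    (pvRun x ys).2.length ≤ ys.length := by
  induction ys with
  | nil => simp [pvRun]
  | cons y ys ih =>
    simp only [pvRun]
    split
    · exact Nat.le_succ_of_le ih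
    · simp

-- B's outer loop: one output entry per maximal run
def clean_movement_path_alt : List String → List String
  | [] => []
  | x :: xs =>
    pvEmit x (((pvRun x xs).1 : Int) + 1) :: clean_movement_path_alt (pvRun x xs).2
termination_by l => l.length
decreasing_by
  exact Nat.lt_succ_of_le (pvRun_snd_length_le x xs)

-- ===== PRECONDITION & SPEC =====
def Spec_clean_movement_path (movement_path : List String) (out : List String) : Prop := out = clean_movement_path_alt movement_path
instance (movement_path : List String) (out : List String) : Decidable (Spec_clean_movement_path movement_path out) := by unfold Spec_clean_movement_path; infer_instance

-- ===== CLAIM (what is proved, stated in full; the proofs are below) =====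
def Claim_equal_clean_movement_path : Prop := ∀ (movement_path : List String), Dom_clean_movement_path movement_path → Spec_clean_movement_path movement_path (clean_movement_path movement_path)

-- ===== LEMMAS AND PROOFS =====

-- A's loop as a pairwise-lookahead recursion on the suffix being processed
def pvARec (c : Int) : List String → List String
  | [] => []
  | [x] => [pvEmit x c]
  | x :: y :: rest =>
    if x == y then pvARec (c + 1) (y :: rest)
    else pvEmit x c :: pvARec 1 (y :: rest)

lemma pvARec_eq_alt (xs : List String) : ∀ (x : String) (c : Int),
    pvARec c (x :: xs)
      = pvEmit x (c + ((pvRun x xs).1 : Int)) :: clean_movement_path_alt (pvRun x xs).2 := by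
  induction xs with
  | nil => intro x c; simp [pvARec, pvRun, clean_movement_path_alt]
  | cons y ys ih =>
    intro x c
    by_cases h : y == x
    · have hx : y = x := by simpa using h
      subst hx
      simp only [pvARec, beq_self_eq_true, if_true, pvRun]
      rw [ih y (c + 1)]
      congr 1
      congr 1
      push_cast
      ring
    · have h' : ¬ ((x == y) = true) := fun e => h (beq_iff_eq.mpr (beq_iff_eq.mp e).symm)
      simp only [pvARec, pvRun, if_neg h, if_neg h']
      rw [ih y 1]
      rw [show clean_movement_path_alt (y :: ys)
            = pvEmit y (((pvRun y ys).1 : Int) + 1) :: clean_movement_path_alt (pvRun y ys).2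
          from by rw [clean_movement_path_alt]]
      rw [show (1 : Int) + ((pvRun y ys).1 : Int) = ((pvRun y ys).1 : Int) + 1 from by ring]
      simp

lemma alt_eq_pvARec (mp : List String) : clean_movement_path_alt mp = pvARec 1 mp := by
  cases mp with
  | nil => simp [clean_movement_path_alt, pvARec]
  | cons x xs =>
    rw [pvARec_eq_alt xs x 1]
    simp only [clean_movement_path_alt]
    congr 2
    ring

lemma loop_inv (mp : List String) : ∀ (m k : Nat) (c : Int) (acc : List String),
    k + m = mp.length →
    ((PySem.List.pyRange (k : Int) (mp.length : Int) 1).foldl (pvStepA mp) (c, acc)).2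
      = acc ++ pvARec c (mp.drop k) := by
  intro m
  induction m with
  | zero =>
    intro k c acc hk
    have hk' : k = mp.length := by omega
    rw [PySem.List.pyRange_one_eq_nil (by omega)]
    simp [hk', pvARec]
  | succ m ih =>
    intro k c acc hk
    have hklt : k < mp.length := by omega
    have hdropk : mp.drop k = mp[k] :: mp.drop (k + 1) := List.drop_eq_getElem_cons hklt
    have hgetk : PySem.List.pyGetD mp (k : Int) "" = mp[k] := by
      rw [PySem.List.pyGetD_natCast]
      exact List.getD_eq_getElem mp "" hklt
    rw [PySem.List.pyRange_one_cons (by exact_mod_cast hklt)]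
    rw [List.foldl_cons]
    by_cases hlast : (k : Int) = (mp.length : Int) - 1
    · -- last index: emit and finish
      have hk1 : k + 1 = mp.length := by omega
      have : pvStepA mp (c, acc) (k : Int)
          = (c, acc ++ [pvEmit mp[k] c]) := by
        simp only [pvStepA, hgetk]
        rw [if_pos hlast]
      rw [this]
      have := ih (k + 1) c (acc ++ [pvEmit mp[k] c]) (by omega)
      push_cast at this ⊢
      rw [this]
      rw [hdropk, List.drop_of_length_le (by omega)]
      simp [pvARec]
    · -- not last: compare with the next element
      have hk1lt : k + 1 < mp.length := by omega
      have hdropk1 : mp.drop (k + 1) = mp[k + 1] :: mp.drop (k + 2) :=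
        List.drop_eq_getElem_cons hk1lt
      have hgetk1 : PySem.List.pyGetD mp ((k : Int) + 1) "" = mp[k + 1] := by
        have : (k : Int) + 1 = ((k + 1 : Nat) : Int) := by push_cast; ring
        rw [this, PySem.List.pyGetD_natCast]
        exact List.getD_eq_getElem mp "" hk1lt
      by_cases heq : mp[k] == mp[k + 1]
      · have : pvStepA mp (c, acc) (k : Int) = (c + 1, acc) := by
          simp [pvStepA, hlast, hgetk, hgetk1, heq]
        rw [this]
        have := ih (k + 1) (c + 1) acc (by omega)
        push_cast at this ⊢
        rw [this]
        rw [hdropk, hdropk1]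
        simp [pvARec, heq, ← hdropk1]
      · have : pvStepA mp (c, acc) (k : Int) = (1, acc ++ [pvEmit mp[k] c]) := by
          simp [pvStepA, hlast, hgetk, hgetk1, heq]
        rw [this]
        have := ih (k + 1) 1 (acc ++ [pvEmit mp[k] c]) (by omega)
        push_cast at this ⊢
        rw [this]
        rw [hdropk, hdropk1]
        simp [pvARec, heq, ← hdropk1]

-- ===== VERDICT (by name: the statement is the Claim_ definition above) =====
theorem clean_movement_path_spec : Claim_equal_clean_movement_path := by
  intro mp _
  unfold Spec_clean_movement_path clean_movement_path
  have h0 : (0 : Int) = ((0 : Nat) : Int) := by norm_num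
  rw [h0, loop_inv mp mp.length 0 1 [] (by omega)]
  simp [alt_eq_pvARec]
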